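-- pv_equiv track=rewrite | github.com/gosch/Katas-in-python | March/maximumSum.py | maximumSum
-- ===== SOURCE A (Python) =====
-- def maximumSum(a, q):
--     c = [[0, i] for i in range(len(a))]
--     for pair in q:
--         for i in range(pair[0], pair[1] + 1):
--             c[i][0] += 1
--
--     c = sorted(c, key=lambda v: v[0], reverse=True)
--     a = sorted(a, reverse=True)
--     r = [0] * len(a)
--     for i in range(len(a)):
--         r[c[i][1]] = a[i]
--
--     s = 0
--     for pair in q:
--         s += sum(r[pair[0]:pair[1] + 1])
--
--     return s
-- ===== SOURCE B (Python) =====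
-- def maximumSum(a, q):
--     n = len(a)
--     diff = [0] * (n + 1)
--     for pair in q:
--         lo, hi = pair[0], pair[1]
--         if lo <= hi:
--             diff[lo] += 1
--             diff[hi + 1] -= 1
--     counts = []
--     run = 0
--     for d in diff[:n]:
--         run += d
--         counts.append(run)
--     counts.sort(reverse=True)
--     a_sorted = sorted(a, reverse=True)
--     return sum(c * v for c, v in zip(counts, a_sorted))
-- ===== Notes on version B (the rewrite author's own statement) =====
-- stated objective: faster
-- what changed: replaces the per-query index-increment loop by a difference array with one prefix-sum pass and replaces the scatter-into-r plus per-query slice re-summation by a single dot product of the descending-sorted counts with the descending-sorted values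
-- outside the precondition, e.g. on maximumSum([5, 7], [[-2, 0]]): A returns 7, B returns 0; on maximumSum([4, 9, 1], [[0, -3]]): A returns 9, B returns 0
import Mathlib
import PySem

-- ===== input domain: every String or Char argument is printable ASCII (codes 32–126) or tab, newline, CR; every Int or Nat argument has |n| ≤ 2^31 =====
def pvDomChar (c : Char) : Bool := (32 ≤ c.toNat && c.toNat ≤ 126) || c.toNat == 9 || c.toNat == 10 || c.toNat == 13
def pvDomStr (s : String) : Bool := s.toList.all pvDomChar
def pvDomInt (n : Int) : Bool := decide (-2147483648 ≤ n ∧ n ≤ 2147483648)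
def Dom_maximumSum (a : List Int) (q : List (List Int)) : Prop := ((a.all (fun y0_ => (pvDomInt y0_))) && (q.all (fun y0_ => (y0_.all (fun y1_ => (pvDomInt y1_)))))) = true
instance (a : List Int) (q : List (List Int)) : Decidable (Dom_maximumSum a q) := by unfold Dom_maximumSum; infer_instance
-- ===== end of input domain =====

-- B replaces A's per-query index-increment loop by a difference array + one prefix-sum pass and A's
-- scatter-into-r + per-query slice re-summation by a single dot product of sorted counts with sorted values.

-- ===== PORT A =====
-- c[i][0] += 1  (c[i] is the pair (count, index))
def pvIncAt (c : List (Int × Int)) (i : Int) : List (Int × Int) :=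
  c.modify i.toNat (fun e => (e.1 + 1, e.2))

-- one iteration of A's counting loop: for i in range(pair[0], pair[1] + 1): c[i][0] += 1
def pvStepA (c : List (Int × Int)) (pair : List Int) : List (Int × Int) :=
  (PySem.List.pyRange (PySem.List.pyGetD pair 0 0) (PySem.List.pyGetD pair 1 0 + 1) 1).foldl pvIncAt c

-- c after the counting loop, from c = [[0, i] for i in range(len(a))]
def pvCountsA (a : List Int) (q : List (List Int)) : List (Int × Int) :=
  q.foldl pvStepA ((List.range a.length).map fun (i : Nat) => ((0 : Int), (i : Int)))

-- r = [0]*len(a); for i in range(len(a)): r[c[i][1]] = a[i]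
def pvBuildR (cs : List (Int × Int)) (as_ : List Int) (n : Nat) : List Int :=
  (List.range n).foldl
    (fun (r : List Int) (i : Nat) =>
      r.set (PySem.List.pyGetD cs (i : Int) (0, 0)).2.toNat (PySem.List.pyGetD as_ (i : Int) 0))
    (List.replicate n 0)

-- s = 0; for pair in q: s += sum(r[pair[0]:pair[1] + 1])
def pvSumSlices (q : List (List Int)) (r : List Int) : Int :=
  q.foldl
    (fun s pair =>
      s + (PySem.List.slice r (some (PySem.List.pyGetD pair 0 0))
            (some (PySem.List.pyGetD pair 1 0 + 1))).sum)
    0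

def maximumSum (a : List Int) (q : List (List Int)) : Int :=
  pvSumSlices q
    (pvBuildR (PySem.List.sorted (pvCountsA a q) (fun v => v.1) true)
      (PySem.List.sorted a (fun x => x) true) a.length)

-- ===== PORT B =====
-- one iteration of B's loop: if lo <= hi: diff[lo] += 1; diff[hi+1] -= 1
def pvStepB (d : List Int) (pair : List Int) : List Int :=
  if PySem.List.pyGetD pair 0 0 ≤ PySem.List.pyGetD pair 1 0 then
    (d.modify (PySem.List.pyGetD pair 0 0).toNat (· + 1)).modify
      (PySem.List.pyGetD pair 1 0 + 1).toNat (· - 1)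
  else d

-- diff = [0]*(n+1); for pair in q: ...
def pvDiff (a : List Int) (q : List (List Int)) : List Int :=
  q.foldl pvStepB (List.replicate (a.length + 1) 0)

-- counts = []; run = 0; for d in ds: run += d; counts.append(run)
def pvPrefix (ds : List Int) : List Int :=
  (ds.foldl (fun (st : Int × List Int) d => (st.1 + d, st.2 ++ [st.1 + d])) ((0 : Int), ([] : List Int))).2

def maximumSum_alt (a : List Int) (q : List (List Int)) : Int :=
  (((PySem.List.sorted
        (pvPrefix (PySem.List.slice (pvDiff a q) none (some (a.length : Int))))
        (fun x => x) true).zip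
      (PySem.List.sorted a (fun x => x) true)).map
    (fun e => e.1 * e.2)).sum

-- ===== PRECONDITION & SPEC =====
-- Pre_ excludes queries on which A raises IndexError (pairs shorter than 2, or an in-range start with
-- an end ≥ len(a)), and queries with a negative endpoint, where A's returned value mixes negative-index
-- wraparound in the counting loop with from-the-end slice semantics in the final summation.
def Pre_maximumSum (a : List Int) (q : List (List Int)) : Prop :=
  ∀ p ∈ q, 2 ≤ p.length ∧ 0 ≤ PySem.List.pyGetD p 0 0 ∧ -1 ≤ PySem.List.pyGetD p 1 0 ∧
    (PySem.List.pyGetD p 0 0 ≤ PySem.List.pyGetD p 1 0 →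
      PySem.List.pyGetD p 1 0 < (a.length : Int))
instance (a : List Int) (q : List (List Int)) : Decidable (Pre_maximumSum a q) := by
  unfold Pre_maximumSum; infer_instance

def pvWitness_maximumSum : List Int × List (List Int) := ([3, 1, 2], [[0, 1], [1, 2]])

def Spec_maximumSum (a : List Int) (q : List (List Int)) (out : Int) : Prop := out = maximumSum_alt a q
instance (a : List Int) (q : List (List Int)) (out : Int) : Decidable (Spec_maximumSum a q out) := by
  unfold Spec_maximumSum; infer_instance

-- ===== CLAIM (what is proved, stated in full; the proofs are below) =====
def Claim_equal_maximumSum : Prop := ∀ (a : List Int) (q : List (List Int)), Dom_maximumSum a q → Pre_maximumSum a q → Spec_maximumSum a q (maximumSum a q)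

-- ===== LEMMAS AND PROOFS =====

-- pvCov p j = 1 if query p covers index j else 0;  pvCnt q j = number of queries covering j
def pvCov (p : List Int) (j : Nat) : Int :=
  if PySem.List.pyGetD p 0 0 ≤ (j : Int) ∧ (j : Int) ≤ PySem.List.pyGetD p 1 0 then 1 else 0

def pvCnt (q : List (List Int)) (j : Nat) : Int :=
  ((q.filter fun p =>
      decide (PySem.List.pyGetD p 0 0 ≤ (j : Int) ∧ (j : Int) ≤ PySem.List.pyGetD p 1 0)).length : Int)

-- contribution of one query to the difference array at position k
def pvD (p : List Int) (k : Nat) : Int :=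
  if PySem.List.pyGetD p 0 0 ≤ PySem.List.pyGetD p 1 0 then
    (if (k : Int) = PySem.List.pyGetD p 0 0 then 1 else 0) -
      (if (k : Int) = PySem.List.pyGetD p 1 0 + 1 then 1 else 0)
  else 0

def pvDcnt (q : List (List Int)) (k : Nat) : Int := (q.map (fun p => pvD p k)).sum

lemma pvCnt_cons (p : List Int) (q : List (List Int)) (j : Nat) :
    pvCnt (p :: q) j = pvCov p j + pvCnt q j := by
  unfold pvCnt pvCov
  rw [List.filter_cons]
  by_cases h : (PySem.List.pyGetD p 0 0 ≤ (j : Int) ∧ (j : Int) ≤ PySem.List.pyGetD p 1 0)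
  · rw [if_pos (by simpa using h), List.length_cons, if_pos h]; omega
  · rw [if_neg (by simpa using h), if_neg h]; omega

lemma pv_sum_map_add_int {α : Type} (l : List α) (f g : α → Int) :
    (l.map fun x => f x + g x).sum = (l.map f).sum + (l.map g).sum := by
  induction l with
  | nil => simp
  | cons x l ih => simp only [List.map_cons, List.sum_cons, ih]; ring

lemma pv_sum_map_sub_int {α : Type} (l : List α) (f g : α → Int) :
    (l.map fun x => f x - g x).sum = (l.map f).sum - (l.map g).sum := by
  induction l with
  | nil => simp
  | cons x l ih => simp only [List.map_cons, List.sum_cons, ih]; ring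

lemma pv_nodup_count (l : List Int) (h : l.Nodup) (x : Int) :
    l.count x = if x ∈ l then 1 else 0 := by
  induction l with
  | nil => simp
  | cons y l ih =>
    rw [List.nodup_cons] at h
    rw [List.count_cons, ih h.2]
    by_cases hxy : x = y
    · subst hxy; simp [h.1]
    · simp [hxy, Ne.symm hxy]

lemma pv_modify_map_range {β : Type} (g : Nat → β) (f : β → β) (n t : Nat) :
    ((List.range n).map g).modify t f = (List.range n).map fun j => if j = t then f (g j) else g j := by
  apply List.ext_getElem
  · simp
  · intro i h1 h2
    simp only [List.getElem_modify, List.getElem_map, List.getElem_range]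
    split_ifs with ha hb hb
    · rfl
    · exact absurd ha.symm hb
    · exact absurd hb.symm ha
    · rfl

lemma pv_take_map_range {β : Type} (f : Nat → β) (m n : Nat) (h : n ≤ m) :
    ((List.range m).map f).take n = (List.range n).map f := by
  apply List.ext_getElem
  · simp; omega
  · intro i h1 h2
    simp only [List.getElem_take, List.getElem_map, List.getElem_range]

lemma pv_foldl_incAt (L : List Int) (n : Nat) (F : Nat → Int)
    (hL : ∀ x ∈ L, 0 ≤ x ∧ x < (n : Int)) :
    L.foldl pvIncAt ((List.range n).map fun j => (F j, (j : Int))) =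
      (List.range n).map fun j => (F j + (L.count (j : Int) : Int), (j : Int)) := by
  induction L generalizing F with
  | nil => simp
  | cons x L ih =>
    obtain ⟨hx0, hxn⟩ := hL x (by simp)
    have hstep : pvIncAt ((List.range n).map fun j => (F j, (j : Int))) x
        = (List.range n).map fun j => ((if j = x.toNat then F j + 1 else F j), (j : Int)) := by
      unfold pvIncAt
      rw [pv_modify_map_range]
      apply List.map_congr_left; intro j _
      split_ifs <;> rfl
    rw [List.foldl_cons, hstep, ih _ (fun y hy => hL y (by simp [hy]))]
    apply List.map_congr_left
    intro j hj
    have hcnt : (x :: L).count (j : Int) = L.count (j : Int) + (if x = (j : Int) then 1 else 0) := by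
      rw [List.count_cons]; simp
    simp only [Prod.mk.injEq]
    refine ⟨?_, trivial⟩
    rw [hcnt]
    push_cast
    by_cases hx : x = (j : Int)
    · rw [if_pos (show j = x.toNat by omega), if_pos hx]; ring
    · rw [if_neg (show ¬ j = x.toNat by omega), if_neg hx]; ring

lemma pv_foldA (n : Nat) (q : List (List Int)) (F : Nat → Int)
    (hq : ∀ p ∈ q, 0 ≤ PySem.List.pyGetD p 0 0 ∧
      (PySem.List.pyGetD p 0 0 ≤ PySem.List.pyGetD p 1 0 → PySem.List.pyGetD p 1 0 < (n : Int))) :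
    q.foldl pvStepA ((List.range n).map fun j => (F j, (j : Int))) =
      (List.range n).map fun j => (F j + pvCnt q j, (j : Int)) := by
  induction q generalizing F with
  | nil => simp [pvCnt]
  | cons p q ih =>
    obtain ⟨hp0, hp1⟩ := hq p (by simp)
    have hstep : pvStepA ((List.range n).map fun j => (F j, (j : Int))) p
        = (List.range n).map fun j => (F j + pvCov p j, (j : Int)) := by
      unfold pvStepA
      rw [pv_foldl_incAt _ n F ?side]
      case side =>
        intro x hx
        rw [PySem.List.mem_pyRange_one] at hx
        refine ⟨le_trans hp0 hx.1, ?_⟩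
        have hle : PySem.List.pyGetD p 0 0 ≤ PySem.List.pyGetD p 1 0 := by omega
        have := hp1 hle
        omega
      apply List.map_congr_left
      intro j hj
      simp only [Prod.mk.injEq]
      refine ⟨?_, trivial⟩
      congr 1
      rw [pv_nodup_count _ (PySem.List.nodup_pyRange_one _ _) _]
      unfold pvCov
      by_cases hmem : PySem.List.pyGetD p 0 0 ≤ (j : Int) ∧ (j : Int) ≤ PySem.List.pyGetD p 1 0
      · rw [if_pos (PySem.List.mem_pyRange_one.mpr ⟨hmem.1, by omega⟩), if_pos hmem]; norm_num
      · rw [if_neg (fun hc => hmem (by rw [PySem.List.mem_pyRange_one] at hc; exact ⟨hc.1, by omega⟩)),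
          if_neg hmem]
        norm_num
    rw [List.foldl_cons, hstep, ih _ (fun p hp => hq p (by simp [hp]))]
    apply List.map_congr_left
    intro j hj
    simp only [Prod.mk.injEq]
    refine ⟨?_, trivial⟩
    rw [pvCnt_cons]; ring

lemma pv_foldB (n : Nat) (q : List (List Int)) (G : Nat → Int)
    (hq : ∀ p ∈ q, 0 ≤ PySem.List.pyGetD p 0 0 ∧ -1 ≤ PySem.List.pyGetD p 1 0) :
    q.foldl pvStepB ((List.range (n + 1)).map G) =
      (List.range (n + 1)).map fun k => G k + pvDcnt q k := by
  induction q generalizing G with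
  | nil => simp [pvDcnt]
  | cons p q ih =>
    obtain ⟨hp0, hp1⟩ := hq p (by simp)
    have hstep : pvStepB ((List.range (n + 1)).map G) p
        = (List.range (n + 1)).map fun k => G k + pvD p k := by
      unfold pvStepB
      by_cases h : PySem.List.pyGetD p 0 0 ≤ PySem.List.pyGetD p 1 0
      · rw [if_pos h, pv_modify_map_range, pv_modify_map_range]
        apply List.map_congr_left
        intro k hk
        unfold pvD
        rw [if_pos h]
        by_cases h1 : (k : Int) = PySem.List.pyGetD p 0 0
        · rw [if_pos (show k = (PySem.List.pyGetD p 0 0).toNat by omega),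
            if_neg (show ¬ k = (PySem.List.pyGetD p 1 0 + 1).toNat by omega),
            if_pos h1, if_neg (show ¬ (k : Int) = PySem.List.pyGetD p 1 0 + 1 by omega)]
          ring
        · by_cases h2 : (k : Int) = PySem.List.pyGetD p 1 0 + 1
          · rw [if_neg (show ¬ k = (PySem.List.pyGetD p 0 0).toNat by omega),
              if_pos (show k = (PySem.List.pyGetD p 1 0 + 1).toNat by omega),
              if_neg h1, if_pos h2]
            ring
          · rw [if_neg (show ¬ k = (PySem.List.pyGetD p 0 0).toNat by omega),
              if_neg (show ¬ k = (PySem.List.pyGetD p 1 0 + 1).toNat by omega),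
              if_neg h1, if_neg h2]
            ring
      · rw [if_neg h]
        apply List.map_congr_left
        intro k hk
        unfold pvD
        rw [if_neg h, add_zero]
    rw [List.foldl_cons, hstep, ih _ (fun p hp => hq p (by simp [hp]))]
    apply List.map_congr_left
    intro k hk
    unfold pvDcnt
    simp only [List.map_cons, List.sum_cons]
    ring

lemma pv_ind_sum (m : Nat) (t : Int) :
    ((List.range m).map fun (k : Nat) => if (k : Int) = t then (1 : Int) else 0).sum
      = if 0 ≤ t ∧ t < (m : Int) then 1 else 0 := by
  induction m with
  | zero =>
    simp only [List.range_zero, List.map_nil, List.sum_nil]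
    rw [if_neg (by omega)]
  | succ m ih =>
    rw [List.range_succ, List.map_append, List.sum_append, ih]
    simp only [List.map_cons, List.map_nil, List.sum_cons, List.sum_nil]
    push_cast
    split_ifs <;> omega

lemma pv_S_eq_cnt (q : List (List Int))
    (hq : ∀ p ∈ q, 0 ≤ PySem.List.pyGetD p 0 0 ∧ -1 ≤ PySem.List.pyGetD p 1 0) (j : Nat) :
    ((List.range (j + 1)).map fun k => pvDcnt q k).sum = pvCnt q j := by
  induction q with
  | nil => simp [pvDcnt, pvCnt]
  | cons p q ih =>
    obtain ⟨hp0, hp1⟩ := hq p (by simp)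
    have hsplit : (fun k => pvDcnt (p :: q) k) = fun k => pvD p k + pvDcnt q k := by
      funext k; simp [pvDcnt]
    rw [hsplit, pv_sum_map_add_int, ih (fun p hp => hq p (by simp [hp])), pvCnt_cons]
    congr 1
    unfold pvD pvCov
    by_cases h : PySem.List.pyGetD p 0 0 ≤ PySem.List.pyGetD p 1 0
    · simp only [if_pos h]
      rw [pv_sum_map_sub_int, pv_ind_sum, pv_ind_sum]
      push_cast
      split_ifs <;> omega
    · simp only [if_neg h]
      rw [if_neg (by omega)]
      simp

-- sum of r[a:a+b] as a sum over all indices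
lemma pv_sum_drop_take (r : List Int) (a b : Nat) :
    ((r.drop a).take b).sum
      = ((List.range r.length).map fun j => if a ≤ j ∧ j < a + b then r.getD j 0 else 0).sum := by
  induction r generalizing a b with
  | nil => simp
  | cons x r ih =>
    cases a with
    | zero =>
      cases b with
      | zero =>
        simp only [List.drop_zero, List.take_zero, List.sum_nil]
        symm
        apply List.sum_eq_zero
        intro y hy
        simp only [List.mem_map, List.mem_range] at hy
        obtain ⟨j, hj, rfl⟩ := hy
        rw [if_neg (by omega)]
      | succ b =>
        simp only [List.drop_zero, List.take_succ_cons, List.sum_cons]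
        have hih := ih 0 b
        simp only [List.drop_zero] at hih
        rw [hih, List.length_cons, List.range_succ_eq_map, List.map_cons, List.sum_cons,
          List.map_map]
        have h0 : (if 0 ≤ 0 ∧ 0 < 0 + (b + 1) then (x :: r).getD 0 0 else 0) = x := by
          rw [if_pos (by omega)]; rfl
        rw [h0]
        congr 1
        apply congrArg
        apply List.map_congr_left
        intro j hj
        simp only [Function.comp_apply]
        by_cases hc : 0 ≤ j ∧ j < 0 + b
        · rw [if_pos hc, if_pos (by omega)]; rfl
        · rw [if_neg hc, if_neg (by omega)]
    | succ a =>
      simp only [List.drop_succ_cons]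
      rw [ih a b, List.length_cons, List.range_succ_eq_map, List.map_cons, List.sum_cons,
        List.map_map]
      have h0 : (if a + 1 ≤ 0 ∧ 0 < a + 1 + b then (x :: r).getD 0 0 else 0) = 0 := by
        rw [if_neg (by omega)]
      rw [h0, zero_add]
      apply congrArg
      apply List.map_congr_left
      intro j hj
      simp only [Function.comp_apply]
      by_cases hc : a ≤ j ∧ j < a + b
      · rw [if_pos hc, if_pos (by omega)]; rfl
      · rw [if_neg hc, if_neg (by omega)]

lemma pv_slice_sum (n : Nat) (r : List Int) (hr : r.length = n) (p : List Int)
    (h0 : 0 ≤ PySem.List.pyGetD p 0 0) (h1 : -1 ≤ PySem.List.pyGetD p 1 0)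
    (h2 : PySem.List.pyGetD p 0 0 ≤ PySem.List.pyGetD p 1 0 → PySem.List.pyGetD p 1 0 < (n : Int)) :
    (PySem.List.slice r (some (PySem.List.pyGetD p 0 0)) (some (PySem.List.pyGetD p 1 0 + 1))).sum
      = ((List.range n).map fun j => pvCov p j * r.getD j 0).sum := by
  rw [PySem.List.slice_toNat r h0 (by omega), pv_sum_drop_take, hr]
  apply congrArg
  apply List.map_congr_left
  intro j hj
  rw [List.mem_range] at hj
  unfold pvCov
  by_cases hc : PySem.List.pyGetD p 0 0 ≤ (j : Int) ∧ (j : Int) ≤ PySem.List.pyGetD p 1 0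
  · have hlh : PySem.List.pyGetD p 0 0 ≤ PySem.List.pyGetD p 1 0 := by omega
    have := h2 hlh
    rw [if_pos (by omega), if_pos hc, one_mul]
  · rw [if_neg (by omega), if_neg hc, zero_mul]

lemma pv_sum_slices_eq (n : Nat) (q : List (List Int)) (r : List Int) (hr : r.length = n) (s0 : Int)
    (hq : ∀ p ∈ q, 0 ≤ PySem.List.pyGetD p 0 0 ∧ -1 ≤ PySem.List.pyGetD p 1 0 ∧
      (PySem.List.pyGetD p 0 0 ≤ PySem.List.pyGetD p 1 0 →
        PySem.List.pyGetD p 1 0 < (n : Int))) :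
    q.foldl
        (fun s pair =>
          s + (PySem.List.slice r (some (PySem.List.pyGetD pair 0 0))
                (some (PySem.List.pyGetD pair 1 0 + 1))).sum) s0
      = s0 + ((List.range n).map fun j => pvCnt q j * r.getD j 0).sum := by
  induction q generalizing s0 with
  | nil => simp [pvCnt]
  | cons p q ih =>
    obtain ⟨hp0, hp1, hp2⟩ := hq p (by simp)
    rw [List.foldl_cons, ih _ (fun p hp => hq p (by simp [hp])),
      pv_slice_sum n r hr p hp0 hp1 hp2]
    have hsplit : ((List.range n).map fun j => pvCnt (p :: q) j * r.getD j 0).sum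
        = ((List.range n).map fun j => pvCov p j * r.getD j 0).sum
          + ((List.range n).map fun j => pvCnt q j * r.getD j 0).sum := by
      rw [← pv_sum_map_add_int]
      apply congrArg
      apply List.map_congr_left
      intro j hj
      rw [pvCnt_cons]; ring
    rw [hsplit]; ring

-- prefix-sum loop characterization
lemma pv_scan_snd (L : List Int) (r : Int) (acc : List Int) :
    (L.foldl (fun (st : Int × List Int) d => (st.1 + d, st.2 ++ [st.1 + d])) (r, acc)).2
      = acc ++ ((List.range L.length).map fun j => r + (L.take (j + 1)).sum) := by
  induction L generalizing r acc with
  | nil => simp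
  | cons d L ih =>
    rw [List.foldl_cons, ih, List.length_cons, List.range_succ_eq_map, List.map_cons,
      List.map_map]
    simp only [List.take_succ_cons, List.sum_cons, List.take_zero, List.sum_nil, add_zero]
    rw [List.append_assoc, List.singleton_append]
    congr 2
    apply List.map_congr_left
    intro j hj
    simp only [Function.comp_apply]
    ring

-- scatter loop lemmas
lemma pv_foldl_set_length (ps : List (Nat × Int)) (r : List Int) :
    (ps.foldl (fun r e => r.set e.1 e.2) r).length = r.length := by
  induction ps generalizing r with
  | nil => rfl
  | cons p ps ih => rw [List.foldl_cons, ih, List.length_set]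

lemma pv_getD_set_ne (r : List Int) (i t : Nat) (v : Int) (h : i ≠ t) :
    (r.set i v).getD t 0 = r.getD t 0 := by
  simp [List.getD_eq_getElem?_getD, List.getElem?_set_ne h]

lemma pv_foldl_set_other (ps : List (Nat × Int)) (r : List Int) (t : Nat)
    (h : ∀ e ∈ ps, e.1 ≠ t) :
    (ps.foldl (fun r e => r.set e.1 e.2) r).getD t 0 = r.getD t 0 := by
  induction ps generalizing r with
  | nil => rfl
  | cons p ps ih =>
    rw [List.foldl_cons, ih _ (fun e he => h e (by simp [he])),
      pv_getD_set_ne _ _ _ _ (h p (by simp))]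

lemma pv_scatter (ps : List (Nat × Int)) (r0 : List Int)
    (hnd : (ps.map Prod.fst).Nodup) (hlt : ∀ e ∈ ps, e.1 < r0.length) :
    ∀ e ∈ ps, (ps.foldl (fun r e => r.set e.1 e.2) r0).getD e.1 0 = e.2 := by
  induction ps generalizing r0 with
  | nil => intro e he; cases he
  | cons p ps ih =>
    rw [List.map_cons, List.nodup_cons] at hnd
    intro e he
    rw [List.foldl_cons]
    rcases List.mem_cons.mp he with rfl | hmem
    · have hne : ∀ e' ∈ ps, e'.1 ≠ e.1 := by
        intro e' he' hco
        exact hnd.1 (hco ▸ List.mem_map_of_mem he')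
      rw [pv_foldl_set_other _ _ _ hne]
      have hp : e.1 < r0.length := hlt e (by simp)
      simp [List.getD_eq_getElem?_getD, hp]
    · exact ih (r0.set p.1 p.2) hnd.2
        (fun e' he' => by rw [List.length_set]; exact hlt e' (by simp [he'])) e hmem

-- dot products over zips of two length-n lists as sums over range n
lemma pv_zip_mul_fst (cs : List (Int × Int)) (as_ : List Int) (n : Nat)
    (h1 : cs.length = n) (h2 : as_.length = n) :
    ((cs.zip as_).map fun e => e.1.1 * e.2).sum
      = ((List.range n).map fun i => (cs.getD i (0, 0)).1 * as_.getD i 0).sum := by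
  apply congrArg
  apply List.ext_getElem
  · simp [h1, h2]
  · intro i hi1 hi2
    simp only [List.getElem_map, List.getElem_zip, List.getElem_range]
    rw [List.getD_eq_getElem cs (0, 0) (by simp [List.length_zip, h1, h2] at hi1; omega),
      List.getD_eq_getElem as_ 0 (by simp [List.length_zip, h1, h2] at hi1; omega)]

-- stable sort by fst commutes with taking fst
lemma pv_map_fst_sorted (c : List (Int × Int)) :
    (PySem.List.sorted c (fun v => v.1) true).map (fun v => v.1)
      = PySem.List.sorted (c.map fun v => v.1) (fun x => x) true := by
  apply List.eq_of_perm_of_sorted (le := fun a b => b ≤ a)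
  · intro x y _ _ hxy hyx; exact le_antisymm hyx hxy
  · exact (PySem.List.sorted_pairwise_rev c (fun v => v.1)).map _ (fun a b h => h)
  · exact PySem.List.sorted_pairwise_rev (c.map fun v => v.1) (fun x => x)
  · exact ((PySem.List.sorted_perm c (fun v => v.1) true).map _).trans
      (PySem.List.sorted_perm (c.map fun v => v.1) (fun x => x) true).symm

-- characterize A's counting phase
lemma pv_countsA_eq (a : List Int) (q : List (List Int))
    (hq : ∀ p ∈ q, 0 ≤ PySem.List.pyGetD p 0 0 ∧
      (PySem.List.pyGetD p 0 0 ≤ PySem.List.pyGetD p 1 0 →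
        PySem.List.pyGetD p 1 0 < (a.length : Int))) :
    pvCountsA a q = (List.range a.length).map fun j => (pvCnt q j, (j : Int)) := by
  unfold pvCountsA
  have h := pv_foldA a.length q (fun _ => 0) hq
  simp only [zero_add] at h
  exact h

-- characterize B's counts
lemma pv_countsB_eq (a : List Int) (q : List (List Int))
    (hq : ∀ p ∈ q, 0 ≤ PySem.List.pyGetD p 0 0 ∧ -1 ≤ PySem.List.pyGetD p 1 0) :
    pvPrefix (PySem.List.slice (pvDiff a q) none (some (a.length : Int)))
      = (List.range a.length).map fun j => pvCnt q j := by
  have hrep : (List.replicate (a.length + 1) (0 : Int))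
      = (List.range (a.length + 1)).map fun _ => (0 : Int) := by
    apply List.ext_getElem <;> simp
  have hdiff : pvDiff a q = (List.range (a.length + 1)).map fun k => pvDcnt q k := by
    unfold pvDiff
    rw [hrep]
    have h := pv_foldB a.length q (fun _ => 0) hq
    simp only [zero_add] at h
    exact h
  rw [hdiff, PySem.List.slice_to_natCast, pv_take_map_range _ _ _ (by omega)]
  unfold pvPrefix
  rw [pv_scan_snd, List.nil_append, List.length_map, List.length_range]
  apply List.map_congr_left
  intro j hj
  rw [List.mem_range] at hj
  rw [pv_take_map_range _ _ _ (by omega), zero_add]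
  exact pv_S_eq_cnt q hq j

-- A's whole computation as a dot product of the sorted count pairs with the sorted values
lemma pvA_eq (a : List Int) (q : List (List Int)) (hPre : Pre_maximumSum a q) :
    maximumSum a q
      = (((PySem.List.sorted ((List.range a.length).map fun j => (pvCnt q j, (j : Int)))
            (fun v => v.1) true).zip (PySem.List.sorted a (fun x => x) true)).map
          fun e => e.1.1 * e.2).sum := by
  have hq : ∀ p ∈ q, 0 ≤ PySem.List.pyGetD p 0 0 ∧ -1 ≤ PySem.List.pyGetD p 1 0 ∧
      (PySem.List.pyGetD p 0 0 ≤ PySem.List.pyGetD p 1 0 →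
        PySem.List.pyGetD p 1 0 < (a.length : Int)) :=
    fun p hp => ⟨(hPre p hp).2.1, (hPre p hp).2.2.1, (hPre p hp).2.2.2⟩
  set n := a.length with hn
  set c : List (Int × Int) := (List.range n).map fun j => (pvCnt q j, (j : Int)) with hc
  set cs := PySem.List.sorted c (fun v => v.1) true with hcs
  set as_ := PySem.List.sorted a (fun x => x) true with has
  have hcsp : cs.Perm c := PySem.List.sorted_perm c (fun v => v.1) true
  have hclen : c.length = n := by rw [hc]; simp
  have hcslen : cs.length = n := by rw [hcsp.length_eq, hclen]
  have haslen : as_.length = n := by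
    rw [has, (PySem.List.sorted_perm a (fun x => x) true).length_eq]
  have hmemc : ∀ e ∈ cs, e.1 = pvCnt q e.2.toNat ∧ 0 ≤ e.2 ∧ e.2 < (n : Int) := by
    intro e he
    have hec : e ∈ c := hcsp.mem_iff.mp he
    rw [hc, List.mem_map] at hec
    obtain ⟨j, hj, rfl⟩ := hec
    rw [List.mem_range] at hj
    refine ⟨by simp, by simp, by simp; omega⟩
  -- the scatter as a fold over explicit (position, value) pairs
  set ps : List (Nat × Int) :=
    (List.range n).map fun (i : Nat) =>
      ((PySem.List.pyGetD cs (i : Int) (0, 0)).2.toNat, PySem.List.pyGetD as_ (i : Int) 0) with hps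
  have hr : pvBuildR cs as_ n = ps.foldl (fun r e => r.set e.1 e.2) (List.replicate n 0) := by
    unfold pvBuildR
    rw [hps, List.foldl_map]
  have hgetcs : ∀ i, i < n → PySem.List.pyGetD cs (i : Int) (0, 0) = cs.getD i (0, 0) := by
    intro i _; exact PySem.List.pyGetD_natCast cs i (0, 0)
  have hgetas : ∀ i, i < n → PySem.List.pyGetD as_ (i : Int) 0 = as_.getD i 0 := by
    intro i _; exact PySem.List.pyGetD_natCast as_ i 0
  -- ps.map fst is a permutation of range n
  have hpsfst : ps.map Prod.fst = cs.map fun e => e.2.toNat := by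
    apply List.ext_getElem
    · simp [hps, hcslen]
    · intro i hi1 hi2
      simp only [hps, List.getElem_map, List.getElem_range]
      have hi : i < n := by simp [hps] at hi1; omega
      rw [hgetcs i hi, List.getD_eq_getElem cs (0, 0) (by rw [hcslen]; exact hi)]
  have hfstperm : (ps.map Prod.fst).Perm (List.range n) := by
    rw [hpsfst]
    have h1 : (cs.map fun e => e.2.toNat).Perm (c.map fun e => e.2.toNat) := hcsp.map _
    have h2 : (c.map fun e => e.2.toNat) = List.range n := by
      rw [hc, List.map_map]
      have hcomp : ((fun (e : Int × Int) => e.2.toNat) ∘ fun (j : Nat) => (pvCnt q j, (j : Int)))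
          = fun (j : Nat) => j := by
        funext j; simp
      rw [hcomp]; simp
    rw [h2] at h1
    exact h1
  have hnd : (ps.map Prod.fst).Nodup := hfstperm.nodup_iff.mpr List.nodup_range
  have hlt : ∀ e ∈ ps, e.1 < (List.replicate n (0 : Int)).length := by
    intro e he
    rw [List.length_replicate]
    rw [hps, List.mem_map] at he
    obtain ⟨i, hi, rfl⟩ := he
    rw [List.mem_range] at hi
    have hic : i < cs.length := by rw [hcslen]; exact hi
    dsimp only
    rw [hgetcs i hi, List.getD_eq_getElem cs (0, 0) hic]
    have hmm := hmemc cs[i] (List.getElem_mem hic)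
    omega
  have hscat := pv_scatter ps (List.replicate n 0) hnd hlt
  set r := ps.foldl (fun r e => r.set e.1 e.2) (List.replicate n (0 : Int)) with hrdef
  have hrlen : r.length = n := by rw [hrdef, pv_foldl_set_length, List.length_replicate]
  -- the final summation
  unfold maximumSum pvSumSlices
  rw [pv_countsA_eq a q (fun p hp => ⟨(hq p hp).1, (hq p hp).2.2⟩), ← hn, ← hc, ← hcs, ← has,
    hr, pv_sum_slices_eq n q r hrlen 0 hq, zero_add,
    pv_zip_mul_fst cs as_ n hcslen haslen]
  rw [← (hfstperm.map fun j => pvCnt q j * r.getD j 0).sum_eq, List.map_map]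
  conv_lhs => rw [hps, List.map_map]
  apply congrArg
  apply List.map_congr_left
  intro i hi
  rw [List.mem_range] at hi
  simp only [Function.comp_apply]
  have hmemps : ((PySem.List.pyGetD cs (i : Int) (0, 0)).2.toNat,
      PySem.List.pyGetD as_ (i : Int) 0) ∈ ps := by
    rw [hps]
    exact List.mem_map_of_mem (List.mem_range.mpr hi)
  have hsc := hscat _ hmemps
  have hic : i < cs.length := by rw [hcslen]; exact hi
  dsimp only at hsc
  rw [hgetcs i hi, hgetas i hi] at hsc
  rw [hgetcs i hi]
  rw [List.getD_eq_getElem cs (0, 0) hic] at hsc ⊢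
  rw [hsc]
  have hm := hmemc cs[i] (List.getElem_mem hic)
  rw [← hm.1]

-- ===== VERDICT (by name: the statement is the Claim_ definition above) =====
theorem maximumSum_spec : Claim_equal_maximumSum := by
  intro a q _ hPre
  unfold Spec_maximumSum
  have hq : ∀ p ∈ q, 0 ≤ PySem.List.pyGetD p 0 0 ∧ -1 ≤ PySem.List.pyGetD p 1 0 ∧
      (PySem.List.pyGetD p 0 0 ≤ PySem.List.pyGetD p 1 0 →
        PySem.List.pyGetD p 1 0 < (a.length : Int)) :=
    fun p hp => ⟨(hPre p hp).2.1, (hPre p hp).2.2.1, (hPre p hp).2.2.2⟩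
  rw [pvA_eq a q hPre]
  unfold maximumSum_alt
  rw [pv_countsB_eq a q (fun p hp => ⟨(hq p hp).1, (hq p hp).2.1⟩)]
  have hkey : ((List.range a.length).map fun j => pvCnt q j)
      = ((List.range a.length).map fun j => (pvCnt q j, (j : Int))).map fun v => v.1 := by
    rw [List.map_map]; rfl
  rw [hkey, ← pv_map_fst_sorted, List.zip_map_left, List.map_map]
  rfl
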